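-- pv_equiv track=rewrite | github.com/rabiloo/wiki-extractor | wiki_extractor/utils/text_utils.py | drop_spans
-- ===== SOURCE A (Python) =====
-- def drop_spans(spans, text):
--     """
--     Drop from text the blocks identified in spans, possibly nested.
--
--     Args:
--         spans: List of (start, end) tuples to remove
--         text: Source text
--
--     Returns:
--         Text with spans removed
--     """
--     spans.sort()
--     result = ''
--     offset = 0
--
--     for start, end in spans:
--         if offset <= start:  # Handle nesting
--             if offset < start:
--                 result += text[offset:start]
--             offset = end
--
--     result += text[offset:]
--     return result
-- ===== SOURCE B (Python) =====
-- def drop_spans(spans, text):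
--     """
--     Drop from text the blocks identified in spans, possibly nested.
--
--     Selection-by-extraction rewrite: instead of sorting the span list and
--     scanning it, repeatedly extract the lexicographically smallest span from
--     the remaining pool (min + remove), emit the kept gap before it when it
--     starts at or after the cursor, and finally join the collected gap pieces.
--     Unlike the original, `spans` is not sorted in place.
--     """
--     remaining = list(spans)
--     parts = []
--     offset = 0
--     while remaining:
--         m = min(remaining)
--         remaining.remove(m)
--         start, end = m
--         if offset <= start:
--             parts.append(text[offset:start])
--             offset = end
--     parts.append(text[offset:])
--     return ''.join(parts)
-- ===== Notes on version B (the rewrite author's own statement) =====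
-- stated objective: alternative
-- what changed: B never sorts: it runs a selection-by-extraction loop that repeatedly takes min() of the remaining span pool and removes it, emitting the kept gap slice when the extracted span starts at or after the cursor, and joins the collected gap pieces at the end; B also does not sort `spans` in place.
import Mathlib
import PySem

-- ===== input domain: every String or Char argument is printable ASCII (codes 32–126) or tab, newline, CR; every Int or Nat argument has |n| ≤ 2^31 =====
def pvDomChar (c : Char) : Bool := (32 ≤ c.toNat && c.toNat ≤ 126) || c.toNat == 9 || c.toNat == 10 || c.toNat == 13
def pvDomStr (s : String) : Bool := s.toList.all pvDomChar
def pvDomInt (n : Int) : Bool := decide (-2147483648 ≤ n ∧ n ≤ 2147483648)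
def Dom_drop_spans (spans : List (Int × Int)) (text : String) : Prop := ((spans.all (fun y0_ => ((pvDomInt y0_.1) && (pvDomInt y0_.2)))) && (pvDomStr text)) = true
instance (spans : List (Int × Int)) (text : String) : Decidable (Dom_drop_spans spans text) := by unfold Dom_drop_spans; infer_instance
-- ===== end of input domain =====

-- B replaces A's sort-then-scan with a selection-by-extraction loop (repeated min()+remove()
-- over the remaining span pool) that collects the kept gap pieces and joins them at the end;
-- objective: alternative. A sorts `spans` in place, B does not: the equivalence proved here
-- is about the RETURN value only.

-- ===== PORT A =====
def drop_spans (spans : List (Int × Int)) (text : String) : String :=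
  -- spans.sort() (value of the sorted list; the in-place mutation itself is not modelled)
  let sp := PySem.List.sorted2 spans (fun p => p.1) (fun p => p.2)
  -- result = ''; offset = 0; for start, end in spans: …
  let st := sp.foldl
    (fun (st : List Char × Int) q =>
      if st.2 ≤ q.1 then
        ((if st.2 < q.1 then st.1 ++ PySem.List.slice text.toList (some st.2) (some q.1) else st.1), q.2)
      else st) ([], 0)
  -- result += text[offset:]
  String.ofList (st.1 ++ PySem.List.slice text.toList (some st.2) none)

-- ===== PORT B =====
-- `remaining.remove(m)` shrinks the pool: used by bLoop's decreasing_by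
theorem pvRemoveSomeLength {α : Type} [BEq α] [LawfulBEq α] (xs ys : List α) (v : α)
    (h : PySem.List.remove? xs v = some ys) : ys.length < xs.length := by
  have hv : v ∈ xs := by
    by_contra hn
    rw [(PySem.List.remove?_eq_none_iff xs v).mpr hn] at h
    cases h
  rw [PySem.List.remove?_eq_some_erase xs v hv] at h
  cases h
  have h1 := List.length_erase_of_mem hv
  have h2 := List.length_pos_of_mem hv
  omega

-- while remaining: m = min(remaining); remaining.remove(m); start, end = m; if offset <= start: …
def bLoop (cs : List Char) (remaining : List (Int × Int)) (parts : List (List Char)) (offset : Int) :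
    List (List Char) × Int :=
  match PySem.List.min2? remaining (fun p => p.1) (fun p => p.2) with
  | none => (parts, offset)       -- `while remaining:` ends (min2? is none only on the empty pool)
  | some m =>
    match h2 : PySem.List.remove? remaining m with
    | none => (parts, offset)     -- unreachable: m ∈ remaining, so Python's remove cannot raise
    | some rem' =>
      if offset ≤ m.1 then
        bLoop cs rem' (parts ++ [PySem.List.slice cs (some offset) (some m.1)]) m.2
      else
        bLoop cs rem' parts offset
termination_by remaining.length
decreasing_by
  · exact pvRemoveSomeLength _ _ _ h2
  · exact pvRemoveSomeLength _ _ _ h2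

def drop_spans_alt (spans : List (Int × Int)) (text : String) : String :=
  -- remaining = list(spans); parts = []; offset = 0; while remaining: …
  let st := bLoop text.toList spans [] 0
  -- parts.append(text[offset:]); return ''.join(parts)
  String.ofList (PySem.Chars.join [] (st.1 ++ [PySem.List.slice text.toList (some st.2) none]))

-- ===== PRECONDITION & SPEC =====
def Spec_drop_spans (spans : List (Int × Int)) (text : String) (out : String) : Prop := out = drop_spans_alt spans text
instance (spans : List (Int × Int)) (text : String) (out : String) : Decidable (Spec_drop_spans spans text out) := by unfold Spec_drop_spans; infer_instance

-- ===== CLAIM (what is proved, stated in full; the proofs are below) =====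
def Claim_equal_drop_spans : Prop := ∀ (spans : List (Int × Int)) (text : String), Dom_drop_spans spans text → Spec_drop_spans spans text (drop_spans spans text)

-- ===== LEMMAS AND PROOFS =====

-- Python's `<` on int pairs (the comparison sorted2/min2? use), and the matching lax order
def ltB (a b : Int × Int) : Bool :=
  decide (a.1 < b.1) || (!decide (b.1 < a.1) && decide (a.2 < b.2))

def leP (a b : Int × Int) : Prop := a.1 < b.1 ∨ (a.1 = b.1 ∧ a.2 ≤ b.2)

lemma leP_total_of_not_ltB {a b : Int × Int} (h : ltB a b = false) : leP b a := by
  simp [ltB] at h; unfold leP; omega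

lemma ltB_leP {a b : Int × Int} (h : ltB a b = true) : leP a b := by
  simp [ltB] at h; unfold leP; omega

lemma leP_trans {a b c : Int × Int} (h1 : leP a b) (h2 : leP b c) : leP a c := by
  unfold leP at *; omega

lemma leP_antisymm {a b : Int × Int} (h1 : leP a b) (h2 : leP b a) : a = b := by
  unfold leP at *
  have h3 : a.1 = b.1 ∧ a.2 = b.2 := by omega
  exact Prod.ext h3.1 h3.2

-- the suffix of A's output produced by the remaining spans, given the current offset
def tailA (cs : List Char) : List (Int × Int) → Int → List Char
  | [], off => PySem.List.slice cs (some off) none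
  | q :: r, off =>
      if off ≤ q.1 then
        (if off < q.1 then PySem.List.slice cs (some off) (some q.1) else []) ++ tailA cs r q.2
      else tailA cs r off

lemma tailA_cons (cs : List Char) (q : Int × Int) (r : List (Int × Int)) (off : Int) :
    tailA cs (q :: r) off
      = if off ≤ q.1 then
          (if off < q.1 then PySem.List.slice cs (some off) (some q.1) else []) ++ tailA cs r q.2
        else tailA cs r off := rfl

lemma slice_self {α : Type} (xs : List α) (a : Int) : PySem.List.slice xs (some a) (some a) = [] :=
  List.eq_nil_of_length_eq_zero (by rw [PySem.List.length_slice]; omega)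

lemma join_nil_cons (x : List Char) (l : List (List Char)) :
    PySem.Chars.join [] (x :: l) = x ++ PySem.Chars.join [] l := by
  cases l with
  | nil => simp [PySem.Chars.join_singleton, PySem.Chars.join_nil]
  | cons y r => simp [PySem.Chars.join_cons_cons]

lemma join_nil_append_singleton (l : List (List Char)) (y : List Char) :
    PySem.Chars.join [] (l ++ [y]) = PySem.Chars.join [] l ++ y := by
  induction l with
  | nil => simp [PySem.Chars.join_singleton, PySem.Chars.join_nil]
  | cons x r ih => simp [join_nil_cons, ih]

-- A's loop computes tailA over the sorted list
lemma loopA (cs : List Char) :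
    ∀ (L : List (Int × Int)) (res : List Char) (off : Int),
      (L.foldl (fun (st : List Char × Int) q =>
          if st.2 ≤ q.1 then
            ((if st.2 < q.1 then st.1 ++ PySem.List.slice cs (some st.2) (some q.1) else st.1), q.2)
          else st) (res, off)).1
        ++ PySem.List.slice cs (some (L.foldl (fun (st : List Char × Int) q =>
          if st.2 ≤ q.1 then
            ((if st.2 < q.1 then st.1 ++ PySem.List.slice cs (some st.2) (some q.1) else st.1), q.2)
          else st) (res, off)).2) none
      = res ++ tailA cs L off := by
  intro L
  induction L with
  | nil => intro res off; simp [tailA]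
  | cons q r ih =>
      intro res off
      by_cases h : off ≤ q.1
      · by_cases h2 : off < q.1 <;> simp [tailA, h, h2, ih, List.append_assoc]
      · simp [tailA, h, ih]

-- insertBy with Python's pair comparison keeps the list leP-pairwise, and is a permutation
lemma insertBy_perm {α : Type} (bef : α → α → Bool) (x : α) :
    ∀ (l : List α), (PySem.List.insertBy bef x l).Perm (x :: l) := by
  intro l
  induction l with
  | nil => simp [PySem.List.insertBy]
  | cons y ys ih =>
      by_cases h : bef x y
      · simp [PySem.List.insertBy, h]
      · simp only [PySem.List.insertBy, h, Bool.false_eq_true, if_false]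
        exact (ih.cons y).trans (List.Perm.swap x y ys)

lemma insertBy_pairwise (x : Int × Int) :
    ∀ (l : List (Int × Int)), l.Pairwise leP → (PySem.List.insertBy ltB x l).Pairwise leP := by
  intro l
  induction l with
  | nil => intro _; simp [PySem.List.insertBy, leP]
  | cons y ys ih =>
      intro hp
      rw [List.pairwise_cons] at hp
      by_cases h : ltB x y
      · simp only [PySem.List.insertBy, h, if_true]
        rw [List.pairwise_cons]
        refine ⟨?_, List.pairwise_cons.mpr hp⟩
        intro z hz
        rcases List.mem_cons.mp hz with rfl | hz'
        · exact ltB_leP h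
        · exact leP_trans (ltB_leP h) (hp.1 z hz')
      · simp only [PySem.List.insertBy, h, Bool.false_eq_true, if_false]
        rw [List.pairwise_cons]
        refine ⟨?_, ih hp.2⟩
        intro z hz
        have := (insertBy_perm ltB x ys).mem_iff.mp hz
        rcases List.mem_cons.mp this with rfl | hz'
        · exact leP_total_of_not_ltB (by simpa using h)
        · exact hp.1 z hz'

-- sorted(spans) (tuple key) is leP-pairwise
lemma sorted2_eq_foldl (l : List (Int × Int)) :
    PySem.List.sorted2 l (fun p => p.1) (fun p => p.2) false
      = l.foldl (fun acc x => PySem.List.insertBy ltB x acc) [] := rfl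

lemma foldl_insertBy_pairwise :
    ∀ (l acc : List (Int × Int)), acc.Pairwise leP →
      (l.foldl (fun acc x => PySem.List.insertBy ltB x acc) acc).Pairwise leP := by
  intro l
  induction l with
  | nil => intro acc h; simpa using h
  | cons x t ih => intro acc h; exact ih _ (insertBy_pairwise x acc h)

lemma sorted2_pairwise' (l : List (Int × Int)) :
    (PySem.List.sorted2 l (fun p => p.1) (fun p => p.2) false).Pairwise leP := by
  rw [sorted2_eq_foldl]; exact foldl_insertBy_pairwise l [] (by simp)

-- the running-minimum step inside min2?
def minStep : Option (Int × Int) → (Int × Int) → Option (Int × Int) := fun acc x =>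
  match acc with
  | none => some x
  | some m => if ltB x m then some x else some m

lemma min2?_eq (l : List (Int × Int)) :
    PySem.List.min2? l (fun p => p.1) (fun p => p.2) = l.foldl minStep none := by
  unfold PySem.List.min2?
  congr 1
  funext acc x
  cases acc <;> simp [minStep, ltB]

-- min(remaining) is a member and leP-below every member
lemma minStep_foldl_spec :
    ∀ (l : List (Int × Int)) (a m : Int × Int),
      (l.foldl minStep (some a) = some m) →
      (m = a ∨ m ∈ l) ∧ leP m a ∧ ∀ y ∈ l, leP m y := by
  intro l
  induction l with
  | nil =>
      intro a m h
      cases h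
      exact ⟨Or.inl rfl, Or.inr ⟨rfl, le_refl _⟩, by simp⟩
  | cons x t ih =>
      intro a m h
      by_cases hx : ltB x a
      · simp only [List.foldl_cons, minStep, hx, if_true] at h
        obtain ⟨hm, hma, hall⟩ := ih x m h
        refine ⟨?_, leP_trans hma (ltB_leP hx), ?_⟩
        · rcases hm with rfl | hm
          · exact Or.inr (by simp)
          · exact Or.inr (List.mem_cons_of_mem _ hm)
        · intro y hy
          rcases List.mem_cons.mp hy with rfl | hy'
          · exact hma
          · exact hall y hy'
      · simp only [List.foldl_cons, minStep, hx, Bool.false_eq_true, if_false] at h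
        obtain ⟨hm, hma, hall⟩ := ih a m h
        refine ⟨?_, hma, ?_⟩
        · rcases hm with rfl | hm
          · exact Or.inl rfl
          · exact Or.inr (List.mem_cons_of_mem _ hm)
        · intro y hy
          rcases List.mem_cons.mp hy with rfl | hy'
          · exact leP_trans hma (leP_total_of_not_ltB (by simpa using hx))
          · exact hall y hy'

lemma min2?_spec (l : List (Int × Int)) (m : Int × Int)
    (h : PySem.List.min2? l (fun p => p.1) (fun p => p.2) = some m) :
    m ∈ l ∧ ∀ y ∈ l, leP m y := by
  rw [min2?_eq] at h
  cases l with
  | nil => cases h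
  | cons x t =>
      have h' : t.foldl minStep (some x) = some m := by
        simpa [minStep] using h
      obtain ⟨hm, hma, hall⟩ := minStep_foldl_spec t x m h'
      constructor
      · rcases hm with rfl | hm
        · simp
        · exact List.mem_cons_of_mem _ hm
      · intro y hy
        rcases List.mem_cons.mp hy with rfl | hy'
        · exact hma
        · exact hall y hy'

lemma minStep_foldl_some :
    ∀ (t : List (Int × Int)) (a : Int × Int), ∃ m, t.foldl minStep (some a) = some m := by
  intro t
  induction t with
  | nil => intro a; exact ⟨a, rfl⟩
  | cons y ys ih =>
      intro a
      by_cases h : ltB y a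
      · simpa [minStep, h] using ih y
      · simpa [minStep, h] using ih a

lemma min2?_nil_iff (l : List (Int × Int)) :
    PySem.List.min2? l (fun p => p.1) (fun p => p.2) = none ↔ l = [] := by
  rw [min2?_eq]
  cases l with
  | nil => simp
  | cons x t =>
      simp only [iff_false, reduceCtorEq, List.foldl_cons]
      obtain ⟨m, hm⟩ := minStep_foldl_some t x
      intro hc
      rw [show minStep none x = some x from rfl, hm] at hc
      cases hc

-- sorting = extracting the minimum, then sorting the rest
lemma sorted2_extract (l : List (Int × Int)) (m : Int × Int)
    (h : PySem.List.min2? l (fun p => p.1) (fun p => p.2) = some m) :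
    PySem.List.sorted2 l (fun p => p.1) (fun p => p.2) false
      = m :: PySem.List.sorted2 (l.erase m) (fun p => p.1) (fun p => p.2) false := by
  obtain ⟨hmem, hmin⟩ := min2?_spec l m h
  apply List.Perm.eq_of_pairwise (le := leP)
  · intro a b _ _ h1 h2; exact leP_antisymm h1 h2
  · exact sorted2_pairwise' l
  · rw [List.pairwise_cons]
    refine ⟨?_, sorted2_pairwise' (l.erase m)⟩
    intro y hy
    have : y ∈ l.erase m := (PySem.List.sorted2_perm (l.erase m) _ _ false).mem_iff.mp hy
    exact hmin y (List.mem_of_mem_erase this)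
  · exact (PySem.List.sorted2_perm l _ _ false).trans
      ((List.perm_cons_erase hmem).trans
        ((PySem.List.sorted2_perm (l.erase m) _ _ false).symm.cons m))

-- B's extraction loop computes tailA over the sorted pool
lemma loopB (cs : List Char) :
    ∀ (n : Nat) (rem : List (Int × Int)), rem.length ≤ n → ∀ (parts : List (List Char)) (off : Int),
      PySem.Chars.join [] ((bLoop cs rem parts off).1
          ++ [PySem.List.slice cs (some (bLoop cs rem parts off).2) none])
      = PySem.Chars.join [] parts
          ++ tailA cs (PySem.List.sorted2 rem (fun p => p.1) (fun p => p.2) false) off := by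
  intro n
  induction n with
  | zero =>
      intro rem hlen parts off
      have hnil : rem = [] := List.eq_nil_of_length_eq_zero (Nat.le_zero.mp hlen)
      subst hnil
      rw [bLoop]
      simp [PySem.List.min2?, PySem.List.sorted2, tailA, join_nil_append_singleton]
  | succ k ih =>
      intro rem hlen parts off
      cases hmin : PySem.List.min2? rem (fun p => p.1) (fun p => p.2) with
      | none =>
          have hnil : rem = [] := (min2?_nil_iff rem).mp hmin
          subst hnil
          rw [bLoop]
          simp [PySem.List.min2?, PySem.List.sorted2, tailA, join_nil_append_singleton]
      | some m =>
          obtain ⟨hmem, _⟩ := min2?_spec rem m hmin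
          have hrm : PySem.List.remove? rem m = some (rem.erase m) :=
            PySem.List.remove?_eq_some_erase rem m hmem
          have hlen' : (rem.erase m).length ≤ k := by
            have h1 := List.length_erase_of_mem hmem
            have h2 := List.length_pos_of_mem hmem
            omega
          rw [bLoop]
          split
          · next heq => rw [hmin] at heq; cases heq
          · next m' heq =>
              rw [hmin] at heq
              cases heq
              split
              · next heq2 => rw [hrm] at heq2; cases heq2
              · next rem' heq2 =>
                  rw [hrm] at heq2
                  cases heq2
                  rw [sorted2_extract rem m hmin]
                  by_cases hoff : off ≤ m.1
                  · simp only [hoff, if_true]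
                    rw [ih _ hlen', join_nil_append_singleton, tailA_cons, if_pos hoff]
                    by_cases h2 : off < m.1
                    · rw [if_pos h2, List.append_assoc]
                    · have hq : m.1 = off := by omega
                      rw [if_neg h2, hq, slice_self]
                      simp
                  · simp only [hoff, if_false]
                    rw [ih _ hlen', tailA_cons, if_neg hoff]

-- ===== VERDICT (by name: the statement is the Claim_ definition above) =====
theorem drop_spans_spec : Claim_equal_drop_spans := by
  intro spans text _
  unfold Spec_drop_spans
  simp only [drop_spans, drop_spans_alt]
  rw [loopB text.toList spans.length spans (le_refl _) [] 0]
  have hA := loopA text.toList (PySem.List.sorted2 spans (fun p => p.1) (fun p => p.2)) [] 0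
  simp only [List.nil_append] at hA
  rw [hA]
  simp [PySem.Chars.join_nil]
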